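-- pv_equiv track=rewrite | github.com/stephendor/TDA_projects | research/implementations/topobench/topobench/transforms/liftings/graph2combinatorial/graph_induced_cc.py | build_paths
-- ===== SOURCE A (Python) =====
-- from collections import defaultdict
--
-- def build_paths(overlap_pairs):
--     """Find overlapint sequesnces.
--
--     Parameters
--     ----------
--     overlap_pairs : list
--         List of pairs of overlapping triangles.
--
--     Returns
--     -------
--     list
--         List of sequences of overlaping triangles.
--     """
--     parent = {}
--
--     def find(x):
--         """Find parent of x.
--
--         Parameters
--         ----------
--         x : int
--             Find parent.
--
--         Returns
--         -------
--         list
--             Union of two lists.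
--         """
--         if parent[x] != x:
--             parent[x] = find(parent[x])
--         return parent[x]
--
--     def union(x, y):
--         """Union.
--
--         Parameters
--         ----------
--         x : list
--             List.
--         y : list
--             List.
--
--         Return
--         ------
--         list
--             Union of two lists.
--         """
--         root_x = find(x)
--         root_y = find(y)
--         if root_x != root_y:
--             parent[root_y] = root_x
--
--     for a, b in overlap_pairs:
--         if a not in parent:
--             parent[a] = a
--         if b not in parent:
--             parent[b] = b
--         union(a, b)
--
--     groups = defaultdict(set)
--     for node in parent:
--         groups[find(node)].add(node)
--
--     return [tuple(sorted(group)) for group in groups.values()]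
-- ===== SOURCE B (Python) =====
-- def build_paths(overlap_pairs):
--     """Find overlapping sequences: merge pairs into connected components.
--
--     Maintains a list of disjoint component sets ordered by first appearance;
--     each pair either creates a component, extends one, or merges two.
--     """
--     comps = []
--     for a, b in overlap_pairs:
--         ia = next((i for i, c in enumerate(comps) if a in c), None)
--         ib = next((i for i, c in enumerate(comps) if b in c), None)
--         if ia is None and ib is None:
--             comps.append({a, b})
--         elif ia is None:
--             comps[ib].add(a)
--         elif ib is None:
--             comps[ia].add(b)
--         elif ia != ib:
--             lo, hi = min(ia, ib), max(ia, ib)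
--             comps[lo] |= comps[hi]
--             del comps[hi]
--     return [tuple(sorted(c)) for c in comps]
-- ===== Notes on version B (the rewrite author's own statement) =====
-- stated objective: simpler
-- what changed: A's path-compressing union-find (parent dict, recursive find, then a second find-and-group pass over the dict) is replaced by a single fold that maintains an ordered list of disjoint component sets, extending or merging them pair by pair, so the find/union machinery and the whole grouping pass disappear.
import Mathlib
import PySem

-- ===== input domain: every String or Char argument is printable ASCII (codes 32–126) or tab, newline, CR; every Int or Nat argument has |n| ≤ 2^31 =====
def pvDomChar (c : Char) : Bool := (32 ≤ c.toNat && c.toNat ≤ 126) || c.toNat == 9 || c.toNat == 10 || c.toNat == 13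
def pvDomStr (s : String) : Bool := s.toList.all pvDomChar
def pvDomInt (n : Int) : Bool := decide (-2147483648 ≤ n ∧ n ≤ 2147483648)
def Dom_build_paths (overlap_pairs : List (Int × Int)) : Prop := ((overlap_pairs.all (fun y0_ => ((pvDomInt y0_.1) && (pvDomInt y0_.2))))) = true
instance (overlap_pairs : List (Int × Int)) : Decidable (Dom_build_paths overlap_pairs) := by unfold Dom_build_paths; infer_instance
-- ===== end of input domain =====

-- B replaces A's path-compressing union-find (plus a second find-and-group pass) by a
-- single fold that merges an ordered list of component sets; same return value, simpler code.

-- ===== PORT A =====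
-- Literal port of A's recursive `find` with path compression. Python's `find` is unbounded
-- recursion; the port carries fuel (called with fuel = parent.size, proved sufficient below:
-- parent chains are strictly descending inside one class, whose size is at most the number of
-- keys), so the fuel-exhaustion branch is never reached. `parent[x]` is read with getD x x;
-- the KeyError case is unreachable because A inserts a key for x before every find.
def pvFind : Nat → PySem.Dict Int Int → Int → Int × PySem.Dict Int Int
  | 0, p, x => (x, p)
  | Nat.succ fuel, p, x =>
    let px := p.getD x x
    if px ≠ x then
      let r := pvFind fuel p px
      (r.1, r.2.insert x r.1)
    else (x, p)

def pvUnion (p : PySem.Dict Int Int) (x y : Int) : PySem.Dict Int Int :=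
  let fx := pvFind p.size p x
  let fy := pvFind fx.2.size fx.2 y
  if fx.1 ≠ fy.1 then fy.2.insert fy.1 fx.1 else fy.2

def pvStepA (p : PySem.Dict Int Int) (ab : Int × Int) : PySem.Dict Int Int :=
  let p1 := if p.contains ab.1 then p else p.insert ab.1 ab.1
  let p2 := if p1.contains ab.2 then p1 else p1.insert ab.2 ab.2
  pvUnion p2 ab.1 ab.2

def pvGroupStep (gp : PySem.Dict Int (PySem.Set Int) × PySem.Dict Int Int) (node : Int) :
    PySem.Dict Int (PySem.Set Int) × PySem.Dict Int Int :=
  let f := pvFind gp.2.size gp.2 node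
  (gp.1.insert f.1 (PySem.Set.add (gp.1.getD f.1 PySem.Set.empty) node), f.2)

def build_paths (overlap_pairs : List (Int × Int)) : List (List Int) :=
  let p := overlap_pairs.foldl pvStepA PySem.Dict.empty
  let g := (p.keys.foldl pvGroupStep (PySem.Dict.empty, p)).1
  g.values.map (fun s => PySem.List.sorted s (fun x => x) false)

-- ===== PORT B =====
def pvStepB (comps : List (PySem.Set Int)) (ab : Int × Int) : List (PySem.Set Int) :=
  match comps.findIdx? (fun c => c.contains ab.1), comps.findIdx? (fun c => c.contains ab.2) with
  | none, none => comps ++ [PySem.Set.add (PySem.Set.add PySem.Set.empty ab.1) ab.2]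
  | none, some j => comps.modify j (fun c => PySem.Set.add c ab.1)
  | some i, none => comps.modify i (fun c => PySem.Set.add c ab.2)
  | some i, some j =>
    if i ≠ j then
      (comps.modify (min i j) (fun c => PySem.Set.union c (comps.getD (max i j) []))).eraseIdx (max i j)
    else comps

def build_paths_alt (overlap_pairs : List (Int × Int)) : List (List Int) :=
  (overlap_pairs.foldl pvStepB []).map (fun c => PySem.List.sorted c (fun x => x) false)

-- ===== PRECONDITION & SPEC =====
def Spec_build_paths (overlap_pairs : List (Int × Int)) (out : List (List Int)) : Prop := out = build_paths_alt overlap_pairs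
instance (overlap_pairs : List (Int × Int)) (out : List (List Int)) : Decidable (Spec_build_paths overlap_pairs out) := by unfold Spec_build_paths; infer_instance

-- ===== CLAIM (what is proved, stated in full; the proofs are below) =====
def Claim_equal_build_paths : Prop := ∀ (overlap_pairs : List (Int × Int)), Dom_build_paths overlap_pairs → Spec_build_paths overlap_pairs (build_paths overlap_pairs)

-- ===== LEMMAS AND PROOFS =====

-- index of the component containing x (0 if none)
def pvIdx (comps : List (PySem.Set Int)) (x : Int) : Nat :=
  (comps.findIdx? (fun c => c.contains x)).getD 0

-- union-find root of x, read off the coupled state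
def pvRoot (comps : List (PySem.Set Int)) (reps : List Int) (x : Int) : Int :=
  reps.getD (pvIdx comps x) 0

-- The coupling invariant between A's parent dict and B's ordered component list.
-- reps i is the union-find root of component i; d is a depth measure on parent chains.
structure pvInv (p : PySem.Dict Int Int) (comps : List (PySem.Set Int))
    (reps : List Int) (d : Int → Nat) : Prop where
  hlen : reps.length = comps.length
  hkeys : ∀ x : Int, x ∈ p.keys ↔ ∃ i, i < comps.length ∧ x ∈ comps.getD i []
  hnodupk : p.keys.Nodup
  hdisj : ∀ i j, i < comps.length → j < comps.length → i ≠ j →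
    ∀ x, x ∈ comps.getD i [] → x ∉ comps.getD j []
  hnodup : ∀ i, i < comps.length → (comps.getD i []).Nodup
  hrep : ∀ i, i < comps.length → reps.getD i 0 ∈ comps.getD i []
  hpar : ∀ i, i < comps.length → ∀ x ∈ comps.getD i [], p.getD x x ∈ comps.getD i []
  hroot : ∀ i, i < comps.length → ∀ x ∈ comps.getD i [],
    (p.getD x x = x ↔ x = reps.getD i 0)
  hdec : ∀ i, i < comps.length → ∀ x ∈ comps.getD i [],
    p.getD x x ≠ x → d (p.getD x x) < d x
  hdrep : ∀ i, i < comps.length → d (reps.getD i 0) = 0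
  hbound : ∀ i, i < comps.length → ∀ x ∈ comps.getD i [], d x < (comps.getD i []).length
  hord : PySem.List.dedup (p.keys.map (pvIdx comps)) = List.range comps.length

-- x in component i determines pvIdx
-- a node lies in at most one component
lemma pvMem_unique {p comps reps d} (inv : pvInv p comps reps d) {x : Int} {i j : Nat}
    (hi : i < comps.length) (hj : j < comps.length)
    (hxi : x ∈ comps.getD i []) (hxj : x ∈ comps.getD j []) : i = j := by
  by_contra hne
  exact inv.hdisj i j hi hj hne x hxi hxj

lemma pvFindIdx_some {comps : List (PySem.Set Int)}
    (hdisj : ∀ i j, i < comps.length → j < comps.length → i ≠ j →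
      ∀ x, x ∈ comps.getD i [] → x ∉ comps.getD j []) {x : Int} {i : Nat}
    (hi : i < comps.length) (hx : x ∈ comps.getD i []) :
    comps.findIdx? (fun c => c.contains x) = some i := by
  rw [List.findIdx?_eq_some_iff_getElem]
  refine ⟨hi, ?_, ?_⟩
  · have hx' : x ∈ comps[i] := (List.getD_eq_getElem comps [] hi) ▸ hx
    exact (PySem.Set.contains_iff _ _).2 hx'
  · intro j hj
    have hjlt : j < comps.length := lt_trans hj hi
    have hnot : x ∉ comps.getD j [] := hdisj i j hi hjlt (by omega) x hx
    rw [List.getD_eq_getElem comps [] hjlt] at hnot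
    simp only [Bool.not_eq_true]
    by_contra hc
    exact hnot ((PySem.Set.contains_iff _ _).1 (by simpa using hc))

lemma pvFindIdx_none {comps : List (PySem.Set Int)} {x : Int}
    (h : ∀ i, i < comps.length → x ∉ comps.getD i []) :
    comps.findIdx? (fun c => c.contains x) = none := by
  rw [List.findIdx?_eq_none_iff]
  intro c hc
  obtain ⟨k, hk, hck⟩ := List.getElem_of_mem hc
  have hnot : x ∉ comps.getD k [] := h k hk
  rw [List.getD_eq_getElem comps [] hk, hck] at hnot
  by_contra hcon
  exact hnot ((PySem.Set.contains_iff _ _).1 (by simpa using hcon))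

lemma pvIdx_eq {comps : List (PySem.Set Int)}
    (hdisj : ∀ i j, i < comps.length → j < comps.length → i ≠ j →
      ∀ x, x ∈ comps.getD i [] → x ∉ comps.getD j []) {x : Int} {i : Nat}
    (hi : i < comps.length) (hx : x ∈ comps.getD i []) : pvIdx comps x = i := by
  unfold pvIdx
  rw [pvFindIdx_some hdisj hi hx]
  rfl

lemma pvKeysLen (p : PySem.Dict Int Int) : p.size = p.keys.length := by
  show p.items.length = (p.items.map Prod.fst).length
  rw [List.length_map]

lemma pvReps_nodup {p comps reps d} (inv : pvInv p comps reps d) : reps.Nodup := by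
  rw [List.nodup_iff_injective_getElem]
  intro ⟨i, hi⟩ ⟨j, hj⟩ hEq
  simp only at hEq
  by_contra hne
  have hij : i ≠ j := by simpa using hne
  have hi' : i < comps.length := inv.hlen ▸ hi
  have hj' : j < comps.length := inv.hlen ▸ hj
  have h1 : reps.getD i 0 ∈ comps.getD i [] := inv.hrep i hi'
  have h2 : reps.getD j 0 ∈ comps.getD j [] := inv.hrep j hj'
  rw [List.getD_eq_getElem reps 0 hi] at h1
  rw [List.getD_eq_getElem reps 0 hj] at h2
  rw [hEq] at h1
  exact inv.hdisj j i hj' hi' (Ne.symm hij) _ h2 h1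

-- find returns the representative, keeps the key list, and preserves the invariant
lemma pvFind_spec {comps reps d} : ∀ (fuel : Nat) (p : PySem.Dict Int Int) (x : Int) (i : Nat),
    pvInv p comps reps d → i < comps.length → x ∈ comps.getD i [] → d x < fuel →
    (pvFind fuel p x).1 = reps.getD i 0 ∧ (pvFind fuel p x).2.keys = p.keys ∧
      pvInv (pvFind fuel p x).2 comps reps d := by
  intro fuel
  induction fuel with
  | zero => intro p x i _ _ _ h; omega
  | succ fuel ih =>
    intro p x i inv hi hx hfuel
    by_cases hpxx : p.getD x x = x
    · have hxr : x = reps.getD i 0 := (inv.hroot i hi x hx).1 hpxx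
      have hre : pvFind (fuel+1) p x = (x, p) := by
        simp only [pvFind, hpxx, ne_eq, not_true_eq_false, if_false]
      rw [hre]
      exact ⟨hxr, rfl, inv⟩
    · have hpx : p.getD x x ∈ comps.getD i [] := inv.hpar i hi x hx
      have hdlt : d (p.getD x x) < d x := inv.hdec i hi x hx hpxx
      obtain ⟨ih1, ih2, ih3⟩ := ih p (p.getD x x) i inv hi hpx (by omega)
      have hxkeys : x ∈ (pvFind fuel p (p.getD x x)).2.keys := by
        rw [ih2]; exact (inv.hkeys x).2 ⟨i, hi, hx⟩
      have hcont : (pvFind fuel p (p.getD x x)).2.contains x = true :=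
        (PySem.Dict.contains_iff_mem_keys _ _).2 hxkeys
      have hkeys' : ((pvFind fuel p (p.getD x x)).2.insert x (pvFind fuel p (p.getD x x)).1).keys
          = p.keys := by
        rw [PySem.Dict.keys_insert_of_contains _ _ hcont, ih2]
      have hxnr : x ≠ reps.getD i 0 := fun hc => hpxx ((inv.hroot i hi x hx).2 hc)
      have hrx : reps.getD i 0 ≠ x := Ne.symm hxnr
      have hdx0 : 0 < d x := by omega
      simp only [pvFind, hpxx, ne_eq, not_false_eq_true, if_true]
      refine ⟨ih1, hkeys', ?_⟩
      set q := (pvFind fuel p (p.getD x x)).2 with hq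
      -- invariant for q.insert x root
      have hgetD : ∀ y : Int, (q.insert x (pvFind fuel p (p.getD x x)).1).getD y y =
          if y = x then reps.getD i 0 else q.getD y y := by
        intro y
        rw [PySem.Dict.getD_insert]
        by_cases h : y = x <;> simp [h, ih1]
      refine ⟨ih3.hlen, ?_, ?_, ih3.hdisj, ih3.hnodup, ih3.hrep, ?_, ?_, ?_, ih3.hdrep,
        ih3.hbound, ?_⟩
      · intro y; rw [hkeys']; exact inv.hkeys y
      · rw [hkeys']; exact inv.hnodupk
      · -- hpar
        intro j hj y hy
        rw [hgetD y]
        by_cases hyx : y = x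
        · subst hyx
          have hji : j = i := pvMem_unique ih3 hj hi hy hx
          rw [if_pos rfl, hji]
          exact ih3.hrep i hi
        · rw [if_neg hyx]; exact ih3.hpar j hj y hy
      · -- hroot
        intro j hj y hy
        rw [hgetD y]
        by_cases hyx : y = x
        · subst hyx
          have hji : j = i := pvMem_unique ih3 hj hi hy hx
          rw [if_pos rfl, hji]
          constructor
          · intro h; exact absurd h.symm hxnr
          · intro h; exact absurd h hxnr
        · rw [if_neg hyx]; exact ih3.hroot j hj y hy
      · -- hdec
        intro j hj y hy hne
        rw [hgetD y] at hne ⊢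
        by_cases hyx : y = x
        · subst hyx
          have hji : j = i := pvMem_unique ih3 hj hi hy hx
          rw [if_pos rfl, ih3.hdrep i hi]
          exact hdx0
        · rw [if_neg hyx] at hne ⊢; exact ih3.hdec j hj y hy hne
      · -- hord
        rw [hkeys']; exact inv.hord

-- a fresh singleton component
-- membership in a component means being a key
lemma pvMem_key {p comps reps d} (inv : pvInv p comps reps d) {y : Int} {j : Nat}
    (hj : j < comps.length) (hy : y ∈ comps.getD j []) : y ∈ p.keys :=
  (inv.hkeys y).2 ⟨j, hj, hy⟩

-- the fuel A passes to find (the dict size) always suffices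
lemma pvFuel {p comps reps d} (inv : pvInv p comps reps d) {x : Int} {i : Nat}
    (hi : i < comps.length) (hx : x ∈ comps.getD i []) : d x < p.size := by
  have h1 := inv.hbound i hi x hx
  have hsub : comps.getD i [] ⊆ p.keys := fun y hy => pvMem_key inv hi hy
  have h2 : (comps.getD i []).length ≤ p.keys.length :=
    (List.Nodup.subperm (inv.hnodup i hi) hsub).length_le
  have h3 := pvKeysLen p
  omega

lemma pvList_ext {α : Type} (l1 l2 : List α) (d0 : α) (h : l1.length = l2.length)
    (he : ∀ k, k < l1.length → l1.getD k d0 = l2.getD k d0) : l1 = l2 := by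
  apply List.ext_getElem h
  intro k h1 h2
  rw [← List.getD_eq_getElem l1 d0 h1, ← List.getD_eq_getElem l2 d0 h2]
  exact he k h1

lemma pvModify_getD {α : Type} (l : List α) (d0 : α) (f : α → α) (i k : Nat)
    (hk : k < l.length) :
    (l.modify i f).getD k d0 = if i = k then f (l.getD k d0) else l.getD k d0 := by
  rw [List.getD_eq_getElem _ _ (by rw [List.length_modify]; exact hk), List.getElem_modify]
  by_cases h : i = k
  · rw [if_pos h, if_pos h, List.getD_eq_getElem _ _ hk]
  · rw [if_neg h, if_neg h, List.getD_eq_getElem _ _ hk]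

lemma pvInv_fresh {p comps reps d} (inv : pvInv p comps reps d) {a : Int}
    (ha : a ∉ p.keys) :
    pvInv (p.insert a a) (comps ++ [[a]]) (reps ++ [a]) (fun x => if x = a then 0 else d x) := by
  have hconta : p.contains a = false := by
    by_contra hc
    exact ha ((PySem.Dict.contains_iff_mem_keys p a).1 (by simpa using hc))
  have hkeys' : (p.insert a a).keys = p.keys ++ [a] :=
    PySem.Dict.keys_insert_of_not_contains p a hconta
  have hlen' : (comps ++ [[a]] : List (PySem.Set Int)).length = comps.length + 1 := by simp
  have hgetlt : ∀ i, i < comps.length → (comps ++ [[a]]).getD i [] = comps.getD i [] :=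
    fun i hi => List.getD_append comps [[a]] [] i hi
  have hgetlast : (comps ++ [[a]]).getD comps.length [] = [a] := by
    simp [List.getD_eq_getElem?_getD]
  have hreplt : ∀ i, i < comps.length → (reps ++ [a]).getD i 0 = reps.getD i 0 :=
    fun i hi => List.getD_append reps [a] 0 i (inv.hlen ▸ hi)
  have hreplast : (reps ++ [a]).getD comps.length 0 = a := by
    rw [← inv.hlen]
    simp [List.getD_eq_getElem?_getD]
  have hnokey : ∀ {y : Int} {j : Nat}, j < comps.length → y ∈ comps.getD j [] → y ≠ a :=
    fun {y j} hj hy hc => ha (hc ▸ pvMem_key inv hj hy)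
  have hgetD : ∀ y : Int, (p.insert a a).getD y y = if y = a then a else p.getD y y := by
    intro y
    rw [PySem.Dict.getD_insert]
  refine ⟨?_, ?_, ?_, ?_, ?_, ?_, ?_, ?_, ?_, ?_, ?_, ?_⟩
  · simp [inv.hlen]
  · intro x
    rw [hkeys', hlen']
    constructor
    · intro hx
      rcases List.mem_append.1 hx with hx | hx
      · obtain ⟨i, hi, hxi⟩ := (inv.hkeys x).1 hx
        exact ⟨i, by omega, (hgetlt i hi).symm ▸ hxi⟩
      · have hxa : x = a := by simpa using hx
        exact ⟨comps.length, by omega, by rw [hgetlast]; simp [hxa]⟩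
    · rintro ⟨i, hi, hxi⟩
      by_cases hilt : i < comps.length
      · exact List.mem_append.2 (Or.inl ((inv.hkeys x).2 ⟨i, hilt, (hgetlt i hilt) ▸ hxi⟩))
      · have : i = comps.length := by omega
        subst this
        rw [hgetlast] at hxi
        simp at hxi
        simp [hxi]
  · rw [hkeys']
    simp [List.nodup_append, inv.hnodupk]
    intro y hy hya
    exact ha (hya ▸ hy)
  · intro i j hi hj hij x hxi hxj
    rw [hlen'] at hi hj
    by_cases hilt : i < comps.length <;> by_cases hjlt : j < comps.length
    · exact inv.hdisj i j hilt hjlt hij x ((hgetlt i hilt) ▸ hxi) ((hgetlt j hjlt) ▸ hxj)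
    · have : j = comps.length := by omega
      subst this
      rw [hgetlast] at hxj
      have hxa : x = a := by simpa using hxj
      exact hnokey hilt ((hgetlt i hilt) ▸ hxi) hxa
    · have : i = comps.length := by omega
      subst this
      rw [hgetlast] at hxi
      have hxa : x = a := by simpa using hxi
      exact hnokey hjlt ((hgetlt j hjlt) ▸ hxj) hxa
    · omega
  · intro i hi
    rw [hlen'] at hi
    by_cases hilt : i < comps.length
    · rw [hgetlt i hilt]; exact inv.hnodup i hilt
    · have : i = comps.length := by omega
      subst this
      rw [hgetlast]
      exact List.nodup_singleton a
  · intro i hi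
    rw [hlen'] at hi
    by_cases hilt : i < comps.length
    · rw [hgetlt i hilt, hreplt i hilt]; exact inv.hrep i hilt
    · have : i = comps.length := by omega
      subst this
      rw [hgetlast, hreplast]
      simp
  · intro i hi y hy
    rw [hlen'] at hi
    by_cases hilt : i < comps.length
    · rw [hgetlt i hilt] at hy ⊢
      rw [hgetD y, if_neg (hnokey hilt hy)]
      exact inv.hpar i hilt y hy
    · have : i = comps.length := by omega
      subst this
      rw [hgetlast] at hy ⊢
      have hya : y = a := by simpa using hy
      subst hya
      rw [hgetD y, if_pos rfl]
      simp
  · intro i hi y hy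
    rw [hlen'] at hi
    by_cases hilt : i < comps.length
    · rw [hgetlt i hilt] at hy
      rw [hgetD y, if_neg (hnokey hilt hy), hreplt i hilt]
      exact inv.hroot i hilt y hy
    · have : i = comps.length := by omega
      subst this
      rw [hgetlast] at hy
      have hya : y = a := by simpa using hy
      subst hya
      rw [hgetD y, if_pos rfl, hreplast]
  · intro i hi y hy hne
    rw [hlen'] at hi
    by_cases hilt : i < comps.length
    · rw [hgetlt i hilt] at hy
      rw [hgetD y, if_neg (hnokey hilt hy)] at hne ⊢
      have hpy : p.getD y y ∈ comps.getD i [] := inv.hpar i hilt y hy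
      simp only [if_neg (hnokey hilt hpy), if_neg (hnokey hilt hy)]
      exact inv.hdec i hilt y hy hne
    · have : i = comps.length := by omega
      subst this
      rw [hgetlast] at hy
      have hya : y = a := by simpa using hy
      subst hya
      rw [hgetD y, if_pos rfl] at hne
      exact absurd rfl hne
  · intro i hi
    rw [hlen'] at hi
    by_cases hilt : i < comps.length
    · rw [hreplt i hilt]
      have hr := inv.hrep i hilt
      simp only [if_neg (hnokey hilt hr)]
      exact inv.hdrep i hilt
    · have : i = comps.length := by omega
      subst this
      rw [hreplast]
      simp
  · intro i hi y hy
    rw [hlen'] at hi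
    by_cases hilt : i < comps.length
    · rw [hgetlt i hilt] at hy ⊢
      simp only [if_neg (hnokey hilt hy)]
      exact inv.hbound i hilt y hy
    · have : i = comps.length := by omega
      subst this
      rw [hgetlast] at hy ⊢
      have hya : y = a := by simpa using hy
      subst hya
      simp
  · -- hord
    have hdisj' : ∀ i j, i < (comps ++ [[a]]).length → j < (comps ++ [[a]]).length → i ≠ j →
        ∀ x, x ∈ (comps ++ [[a]]).getD i [] → x ∉ (comps ++ [[a]]).getD j [] := by
      intro i j hi hj hij x hxi hxj
      rw [hlen'] at hi hj
      by_cases hilt : i < comps.length <;> by_cases hjlt : j < comps.length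
      · exact inv.hdisj i j hilt hjlt hij x ((hgetlt i hilt) ▸ hxi) ((hgetlt j hjlt) ▸ hxj)
      · have : j = comps.length := by omega
        subst this
        rw [hgetlast] at hxj
        exact hnokey hilt ((hgetlt i hilt) ▸ hxi) (by simpa using hxj)
      · have : i = comps.length := by omega
        subst this
        rw [hgetlast] at hxi
        exact hnokey hjlt ((hgetlt j hjlt) ▸ hxj) (by simpa using hxi)
      · omega
    have hmap : p.keys.map (pvIdx (comps ++ [[a]])) = p.keys.map (pvIdx comps) := by
      apply List.map_congr_left
      intro y hyk
      obtain ⟨i, hi, hyi⟩ := (inv.hkeys y).1 hyk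
      rw [pvIdx_eq hdisj' (by omega) ((hgetlt i hi).symm ▸ hyi), pvIdx_eq inv.hdisj hi hyi]
    have hidxa : pvIdx (comps ++ [[a]]) a = comps.length := by
      apply pvIdx_eq hdisj' (by omega)
      rw [hgetlast]; simp
    rw [hkeys', hlen', List.map_append, List.map_cons, List.map_nil, hmap]
    rw [hidxa, PySem.List.dedup_eq_ofList, PySem.Set.ofList_append_singleton]
    have hord := inv.hord
    rw [PySem.List.dedup_eq_ofList] at hord
    rw [hord]
    rw [PySem.Set.add_of_not_mem (by simp), List.range_succ]

-- dedup of a mapped list only depends on the dedup of the list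
lemma pvDedup_map {α β : Type} [BEq α] [LawfulBEq α] [BEq β] [LawfulBEq β] (f : α → β) :
    ∀ (l : List α),
    PySem.List.dedup (l.map f) = PySem.List.dedup ((PySem.List.dedup l).map f) := by
  intro l
  induction l using List.reverseRecOn with
  | nil => rfl
  | append_singleton l a ih =>
    simp only [List.map_append, List.map_cons, List.map_nil, PySem.List.dedup_eq_ofList,
      PySem.Set.ofList_append_singleton] at *
    by_cases hmem : a ∈ PySem.Set.ofList l
    · rw [PySem.Set.add_of_mem hmem]
      have hfa : f a ∈ PySem.Set.ofList (l.map f) := by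
        rw [PySem.Set.mem_ofList] at hmem ⊢
        exact List.mem_map_of_mem hmem
      rw [PySem.Set.add_of_mem hfa, ih]
    · rw [PySem.Set.add_of_not_mem hmem, List.map_append, List.map_cons, List.map_nil,
        PySem.Set.ofList_append_singleton, ih]

-- getD through a modify-then-eraseIdx (the shape of B's merge step)
lemma pvModifyErase_getD {α : Type} (l : List α) (d0 : α) (f : α → α) (lo hih : Nat)
    (hlohi : lo < hih) (hhin : hih < l.length) (k : Nat) (hk : k < l.length - 1) :
    ((l.modify lo f).eraseIdx hih).getD k d0 =
      if k = lo then f (l.getD lo d0) else if k < hih then l.getD k d0 else l.getD (k+1) d0 := by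
  have hlen : ((l.modify lo f).eraseIdx hih).length = l.length - 1 := by
    rw [List.length_eraseIdx]
    simp [List.length_modify, hhin]
  rw [List.getD_eq_getElem _ _ (by rw [hlen]; omega : k < ((l.modify lo f).eraseIdx hih).length)]
  rw [List.getElem_eraseIdx]
  by_cases hkh : k < hih
  · rw [dif_pos hkh, List.getElem_modify]
    by_cases hkl : k = lo
    · subst hkl
      rw [if_pos rfl, if_pos rfl, List.getD_eq_getElem _ _ (by omega : k < l.length)]
    · rw [if_neg (fun hc => hkl hc.symm), if_neg hkl, if_pos hkh,
        List.getD_eq_getElem _ _ (by omega : k < l.length)]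
  · rw [dif_neg hkh, List.getElem_modify]
    rw [if_neg (by omega), if_neg (by omega), if_neg (by omega),
      List.getD_eq_getElem _ _ (by omega : k + 1 < l.length)]

lemma pvSetErase_getD {α : Type} (l : List α) (d0 : α) (r : α) (lo hih : Nat)
    (hlohi : lo < hih) (hhin : hih < l.length) (k : Nat) (hk : k < l.length - 1) :
    ((l.set lo r).eraseIdx hih).getD k d0 =
      if k = lo then r else if k < hih then l.getD k d0 else l.getD (k+1) d0 := by
  have hlen : ((l.set lo r).eraseIdx hih).length = l.length - 1 := by
    rw [List.length_eraseIdx]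
    simp [List.length_set, hhin]
  rw [List.getD_eq_getElem _ _ (by rw [hlen]; omega : k < ((l.set lo r).eraseIdx hih).length)]
  rw [List.getElem_eraseIdx]
  by_cases hkh : k < hih
  · rw [dif_pos hkh, List.getElem_set]
    by_cases hkl : k = lo
    · subst hkl
      rw [if_pos rfl, if_pos rfl]
    · rw [if_neg (fun hc => hkl hc.symm), if_neg hkl, if_pos hkh,
        List.getD_eq_getElem _ _ (by omega : k < l.length)]
  · rw [dif_neg hkh, List.getElem_set]
    rw [if_neg (by omega), if_neg (by omega), if_neg (by omega),
      List.getD_eq_getElem _ _ (by omega : k + 1 < l.length)]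

-- linking root j under root i merges the two components at position lo = min i j
lemma pvInv_link {p comps reps d} (inv : pvInv p comps reps d) {i j lo hih : Nat}
    (hi : i < comps.length) (hj : j < comps.length) (hij : i ≠ j)
    (hcase : (lo = i ∧ hih = j) ∨ (lo = j ∧ hih = i)) (hlohi : lo < hih) :
    pvInv (p.insert (reps.getD j 0) (reps.getD i 0))
      ((comps.modify lo (fun c => PySem.Set.union c (comps.getD hih []))).eraseIdx hih)
      ((reps.set lo (reps.getD i 0)).eraseIdx hih)
      (fun x => if x ∈ comps.getD j [] then d x + 1 else d x) := by
  have hhin : hih < comps.length := by rcases hcase with ⟨h1, h2⟩ | ⟨h1, h2⟩ <;> omega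
  have hlon : lo < comps.length := by omega
  have hra_mem : reps.getD i 0 ∈ comps.getD i [] := inv.hrep i hi
  have hrb_mem : reps.getD j 0 ∈ comps.getD j [] := inv.hrep j hj
  have hdisj_ij : ∀ y, y ∈ comps.getD i [] → y ∉ comps.getD j [] :=
    fun y => inv.hdisj i j hi hj hij y
  have hab : reps.getD i 0 ≠ reps.getD j 0 :=
    fun hc => hdisj_ij _ hra_mem (hc ▸ hrb_mem)
  have hrb_key : reps.getD j 0 ∈ p.keys := pvMem_key inv hj hrb_mem
  have hunion : PySem.Set.union (comps.getD lo []) (comps.getD hih [])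
      = comps.getD lo [] ++ comps.getD hih [] := by
    apply PySem.Set.update_eq_append_of_disjoint _ _ (inv.hnodup hih hhin)
    intro y hy
    exact inv.hdisj hih lo hhin hlon (by omega) y hy
  have hlen' : ((comps.modify lo (fun c => PySem.Set.union c (comps.getD hih []))).eraseIdx hih).length
      = comps.length - 1 := by
    rw [List.length_eraseIdx]
    simp [List.length_modify, hhin]
  have hrlen' : ((reps.set lo (reps.getD i 0)).eraseIdx hih).length = comps.length - 1 := by
    have hhr : hih < reps.length := by rw [inv.hlen]; omega
    rw [List.length_eraseIdx]
    simp only [List.length_set]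
    rw [if_pos hhr, inv.hlen]
  have hcomp' : ∀ k, k < comps.length - 1 →
      ((comps.modify lo (fun c => PySem.Set.union c (comps.getD hih []))).eraseIdx hih).getD k [] =
      if k = lo then comps.getD lo [] ++ comps.getD hih []
      else if k < hih then comps.getD k [] else comps.getD (k+1) [] := by
    intro k hk
    rw [pvModifyErase_getD comps [] _ lo hih hlohi hhin k hk]
    by_cases hkl : k = lo
    · rw [if_pos hkl, if_pos hkl, hunion]
    · rw [if_neg hkl, if_neg hkl]
  have hrep' : ∀ k, k < comps.length - 1 →
      ((reps.set lo (reps.getD i 0)).eraseIdx hih).getD k 0 =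
      if k = lo then reps.getD i 0
      else if k < hih then reps.getD k 0 else reps.getD (k+1) 0 :=
    fun k hk => pvSetErase_getD reps 0 _ lo hih hlohi (by rw [inv.hlen]; omega) k
      (by rw [inv.hlen]; omega)
  have hkeys' : (p.insert (reps.getD j 0) (reps.getD i 0)).keys = p.keys :=
    PySem.Dict.keys_insert_of_contains p _ ((PySem.Dict.contains_iff_mem_keys p _).2 hrb_key)
  have hgetDp : ∀ y : Int, (p.insert (reps.getD j 0) (reps.getD i 0)).getD y y =
      if y = reps.getD j 0 then reps.getD i 0 else p.getD y y :=
    fun y => PySem.Dict.getD_insert p _ y _ y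
  have hnotrb : ∀ {m : Nat}, m < comps.length → m ≠ j → ∀ {y : Int},
      y ∈ comps.getD m [] → y ≠ reps.getD j 0 :=
    fun {m} hm hmj {y} hy hc => inv.hdisj m j hm hj hmj y hy (hc ▸ hrb_mem)
  have hmem' : ∀ k, k < comps.length - 1 → ∀ y : Int,
      (y ∈ ((comps.modify lo (fun c => PySem.Set.union c (comps.getD hih []))).eraseIdx hih).getD k []) ↔
      (if k = lo then y ∈ comps.getD i [] ∨ y ∈ comps.getD j []
       else if k < hih then y ∈ comps.getD k [] else y ∈ comps.getD (k+1) []) := by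
    intro k hk y
    rw [hcomp' k hk]
    by_cases hkl : k = lo
    · rw [if_pos hkl, if_pos hkl, List.mem_append]
      rcases hcase with ⟨h1, h2⟩ | ⟨h1, h2⟩ <;> rw [h1, h2] <;> tauto
    · rw [if_neg hkl, if_neg hkl]
      split_ifs <;> rfl
  have hdisjNew : ∀ k l, k < comps.length - 1 → l < comps.length - 1 → k ≠ l → ∀ x : Int,
      x ∈ ((comps.modify lo (fun c => PySem.Set.union c (comps.getD hih []))).eraseIdx hih).getD k [] →
      x ∉ ((comps.modify lo (fun c => PySem.Set.union c (comps.getD hih []))).eraseIdx hih).getD l [] := by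
    intro k l hk hl hkl x hxk hxl
    rw [hmem' k hk x] at hxk
    rw [hmem' l hl x] at hxl
    have old : ∀ {m : Nat}, m < comps.length - 1 →
        (if m = lo then x ∈ comps.getD i [] ∨ x ∈ comps.getD j []
         else if m < hih then x ∈ comps.getD m [] else x ∈ comps.getD (m+1) []) →
        ∃ m', m' < comps.length ∧ x ∈ comps.getD m' [] ∧
          (m = lo → (m' = i ∨ m' = j)) ∧
          (m ≠ lo → m' = (if m < hih then m else m + 1) ∧ m' ≠ i ∧ m' ≠ j) := by
      intro m hm hmem
      by_cases hml : m = lo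
      · rw [if_pos hml] at hmem
        rcases hmem with h | h
        · exact ⟨i, hi, h, fun _ => Or.inl rfl, fun hc => absurd hml hc⟩
        · exact ⟨j, hj, h, fun _ => Or.inr rfl, fun hc => absurd hml hc⟩
      · rw [if_neg hml] at hmem
        by_cases hmh : m < hih
        · rw [if_pos hmh] at hmem
          refine ⟨m, by omega, hmem, fun hc => absurd hc hml, fun _ => ⟨by rw [if_pos hmh], ?_, ?_⟩⟩
          <;> rcases hcase with ⟨h1, h2⟩ | ⟨h1, h2⟩ <;> omega
        · rw [if_neg hmh] at hmem
          refine ⟨m + 1, by omega, hmem, fun hc => absurd hc hml, fun _ => ⟨by rw [if_neg hmh], ?_, ?_⟩⟩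
          <;> rcases hcase with ⟨h1, h2⟩ | ⟨h1, h2⟩ <;> omega
    obtain ⟨mk, hmk, hxmk, hmkl, hmknl⟩ := old hk hxk
    obtain ⟨ml, hml, hxml, hmll, hmlnl⟩ := old hl hxl
    have hne : mk ≠ ml := by
      by_cases h1 : k = lo <;> by_cases h2 : l = lo
      · exact absurd (h1.trans h2.symm) hkl
      · rcases hmkl h1 with e1 | e1 <;>
          obtain ⟨e2, e3, e4⟩ := hmlnl h2 <;> omega
      · rcases hmll h2 with e1 | e1 <;>
          obtain ⟨e2, e3, e4⟩ := hmknl h1 <;> omega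
      · obtain ⟨e1, e2, e3⟩ := hmknl h1
        obtain ⟨f1, f2, f3⟩ := hmlnl h2
        by_cases c1 : k < hih <;> by_cases c2 : l < hih <;>
          simp only [c1, c2, if_true, if_false] at e1 f1 <;> omega
    exact inv.hdisj mk ml hmk hml hne x hxmk hxml
  have hdisjC : ∀ a b,
      a < ((comps.modify lo (fun c => PySem.Set.union c (comps.getD hih []))).eraseIdx hih).length →
      b < ((comps.modify lo (fun c => PySem.Set.union c (comps.getD hih []))).eraseIdx hih).length →
      a ≠ b → ∀ x : Int,
      x ∈ ((comps.modify lo (fun c => PySem.Set.union c (comps.getD hih []))).eraseIdx hih).getD a [] →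
      x ∉ ((comps.modify lo (fun c => PySem.Set.union c (comps.getD hih []))).eraseIdx hih).getD b [] := by
    intro a b ha hb
    rw [hlen'] at ha hb
    exact hdisjNew a b ha hb
  refine ⟨?_, ?_, ?_, ?_, ?_, ?_, ?_, ?_, ?_, ?_, ?_, ?_⟩
  · rw [hrlen', hlen']
  · intro x
    rw [hkeys', hlen']
    constructor
    · intro hx
      obtain ⟨m, hm, hxm⟩ := (inv.hkeys x).1 hx
      by_cases hmh : m = hih
      · refine ⟨lo, by omega, ?_⟩
        rw [hmem' lo (by omega) x, if_pos rfl]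
        rcases hcase with ⟨h1, h2⟩ | ⟨h1, h2⟩
        · right; rw [← h2, ← hmh]; exact hxm
        · left; rw [← h2, ← hmh]; exact hxm
      · by_cases hmlt : m < hih
        · refine ⟨m, by omega, ?_⟩
          rw [hmem' m (by omega) x]
          by_cases hml : m = lo
          · rw [if_pos hml]
            rcases hcase with ⟨h1, h2⟩ | ⟨h1, h2⟩
            · left; rw [← h1, ← hml]; exact hxm
            · right; rw [← h1, ← hml]; exact hxm
          · rw [if_neg hml, if_pos hmlt]; exact hxm
        · refine ⟨m - 1, by omega, ?_⟩
          rw [hmem' (m-1) (by omega) x, if_neg (by omega), if_neg (by omega)]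
          have hmm : m - 1 + 1 = m := by omega
          rw [hmm]; exact hxm
    · rintro ⟨k, hk, hxk⟩
      rw [hmem' k (by omega) x] at hxk
      by_cases hkl : k = lo
      · rw [if_pos hkl] at hxk
        rcases hxk with h | h
        · exact pvMem_key inv hi h
        · exact pvMem_key inv hj h
      · rw [if_neg hkl] at hxk
        by_cases hkh : k < hih
        · rw [if_pos hkh] at hxk; exact pvMem_key inv (by omega) hxk
        · rw [if_neg hkh] at hxk; exact pvMem_key inv (by omega) hxk
  · rw [hkeys']; exact inv.hnodupk
  · -- disjointness
    intro k l hk hl hkl x hxk hxl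
    rw [hlen'] at hk hl
    exact hdisjNew k l hk hl hkl x hxk hxl
  · intro k hk
    rw [hlen'] at hk
    rw [hcomp' k hk]
    by_cases hkl : k = lo
    · rw [if_pos hkl, List.nodup_append]
      refine ⟨inv.hnodup lo hlon, inv.hnodup hih hhin, ?_⟩
      intro y hy b hb hyb
      exact inv.hdisj lo hih hlon hhin (by omega) y hy (hyb ▸ hb)
    · rw [if_neg hkl]
      by_cases hkh : k < hih
      · rw [if_pos hkh]; exact inv.hnodup k (by omega)
      · rw [if_neg hkh]; exact inv.hnodup (k+1) (by omega)
  · intro k hk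
    rw [hlen'] at hk
    rw [hrep' k hk, hmem' k hk]
    by_cases hkl : k = lo
    · rw [if_pos hkl, if_pos hkl]
      exact Or.inl hra_mem
    · rw [if_neg hkl, if_neg hkl]
      by_cases hkh : k < hih
      · rw [if_pos hkh, if_pos hkh]; exact inv.hrep k (by omega)
      · rw [if_neg hkh, if_neg hkh]; exact inv.hrep (k+1) (by omega)
  · -- hpar
    intro k hk y hy
    rw [hlen'] at hk
    rw [hmem' k hk] at hy
    rw [hmem' k hk, hgetDp y]
    by_cases hkl : k = lo
    · rw [if_pos hkl] at hy ⊢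
      by_cases hyrb : y = reps.getD j 0
      · rw [if_pos hyrb]; exact Or.inl hra_mem
      · rw [if_neg hyrb]
        rcases hy with h | h
        · exact Or.inl (inv.hpar i hi y h)
        · exact Or.inr (inv.hpar j hj y h)
    · rw [if_neg hkl] at hy ⊢
      by_cases hkh : k < hih
      · rw [if_pos hkh] at hy ⊢
        have hknj : k ≠ j := by rcases hcase with ⟨h1, h2⟩ | ⟨h1, h2⟩ <;> omega
        rw [if_neg (hnotrb (by omega) hknj hy)]
        exact inv.hpar k (by omega) y hy
      · rw [if_neg hkh] at hy ⊢
        have hknj : k + 1 ≠ j := by rcases hcase with ⟨h1, h2⟩ | ⟨h1, h2⟩ <;> omega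
        rw [if_neg (hnotrb (by omega) hknj hy)]
        exact inv.hpar (k+1) (by omega) y hy
  · -- hroot
    intro k hk y hy
    rw [hlen'] at hk
    rw [hmem' k hk] at hy
    rw [hrep' k hk, hgetDp y]
    by_cases hkl : k = lo
    · rw [if_pos hkl] at hy ⊢
      by_cases hyrb : y = reps.getD j 0
      · rw [if_pos hyrb, hyrb]
        constructor
        · intro h; exact absurd h hab
        · intro h; exact absurd h.symm hab
      · rw [if_neg hyrb]
        rcases hy with h | h
        · exact inv.hroot i hi y h
        · constructor
          · intro hc
            exact absurd ((inv.hroot j hj y h).1 hc) hyrb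
          · intro hc
            exact absurd (hc ▸ hra_mem) (fun hm => hdisj_ij y hm h)
    · rw [if_neg hkl] at hy ⊢
      by_cases hkh : k < hih
      · rw [if_pos hkh] at hy ⊢
        have hknj : k ≠ j := by rcases hcase with ⟨h1, h2⟩ | ⟨h1, h2⟩ <;> omega
        rw [if_neg (hnotrb (by omega) hknj hy)]
        exact inv.hroot k (by omega) y hy
      · rw [if_neg hkh] at hy ⊢
        have hknj : k + 1 ≠ j := by rcases hcase with ⟨h1, h2⟩ | ⟨h1, h2⟩ <;> omega
        rw [if_neg (hnotrb (by omega) hknj hy)]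
        exact inv.hroot (k+1) (by omega) y hy
  · -- hdec
    intro k hk y hy hne
    rw [hlen'] at hk
    rw [hmem' k hk] at hy
    rw [hgetDp y] at hne ⊢
    by_cases hkl : k = lo
    · rw [if_pos hkl] at hy
      by_cases hyrb : y = reps.getD j 0
      · rw [if_pos hyrb] at hne ⊢
        have h1 : reps.getD i 0 ∉ comps.getD j [] := fun hm => hdisj_ij _ hra_mem hm
        simp only [if_neg h1, if_pos (hyrb ▸ hrb_mem)]
        have h0 : d (reps.getD i 0) = 0 := inv.hdrep i hi
        omega
      · rw [if_neg hyrb] at hne ⊢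
        rcases hy with h | h
        · have hpy : p.getD y y ∈ comps.getD i [] := inv.hpar i hi y h
          simp only [if_neg (hdisj_ij _ hpy), if_neg (hdisj_ij _ h)]
          exact inv.hdec i hi y h hne
        · have hpy : p.getD y y ∈ comps.getD j [] := inv.hpar j hj y h
          simp only [if_pos hpy, if_pos h]
          have := inv.hdec j hj y h hne
          omega
    · rw [if_neg hkl] at hy
      by_cases hkh : k < hih
      · rw [if_pos hkh] at hy
        have hknj : k ≠ j := by rcases hcase with ⟨h1, h2⟩ | ⟨h1, h2⟩ <;> omega
        rw [if_neg (hnotrb (by omega) hknj hy)] at hne ⊢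
        have hpy : p.getD y y ∈ comps.getD k [] := inv.hpar k (by omega) y hy
        simp only [if_neg (fun hm => inv.hdisj k j (by omega) hj hknj _ hpy hm),
          if_neg (fun hm => inv.hdisj k j (by omega) hj hknj _ hy hm)]
        exact inv.hdec k (by omega) y hy hne
      · rw [if_neg hkh] at hy
        have hknj : k + 1 ≠ j := by rcases hcase with ⟨h1, h2⟩ | ⟨h1, h2⟩ <;> omega
        rw [if_neg (hnotrb (by omega) hknj hy)] at hne ⊢
        have hpy : p.getD y y ∈ comps.getD (k+1) [] := inv.hpar (k+1) (by omega) y hy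
        simp only [if_neg (fun hm => inv.hdisj (k+1) j (by omega) hj hknj _ hpy hm),
          if_neg (fun hm => inv.hdisj (k+1) j (by omega) hj hknj _ hy hm)]
        exact inv.hdec (k+1) (by omega) y hy hne
  · -- hdrep
    intro k hk
    rw [hlen'] at hk
    rw [hrep' k hk]
    by_cases hkl : k = lo
    · rw [if_pos hkl]
      simp only [if_neg (fun hm => hdisj_ij _ hra_mem hm)]
      exact inv.hdrep i hi
    · rw [if_neg hkl]
      by_cases hkh : k < hih
      · rw [if_pos hkh]
        have hknj : k ≠ j := by rcases hcase with ⟨h1, h2⟩ | ⟨h1, h2⟩ <;> omega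
        simp only [if_neg (fun hm => inv.hdisj k j (by omega) hj hknj _ (inv.hrep k (by omega)) hm)]
        exact inv.hdrep k (by omega)
      · rw [if_neg hkh]
        have hknj : k + 1 ≠ j := by rcases hcase with ⟨h1, h2⟩ | ⟨h1, h2⟩ <;> omega
        simp only [if_neg (fun hm => inv.hdisj (k+1) j (by omega) hj hknj _ (inv.hrep (k+1) (by omega)) hm)]
        exact inv.hdrep (k+1) (by omega)
  · -- hbound
    intro k hk y hy
    rw [hlen'] at hk
    rw [hmem' k hk] at hy
    rw [hcomp' k hk]
    by_cases hkl : k = lo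
    · rw [if_pos hkl] at hy ⊢
      rw [List.length_append]
      have hilen : 0 < (comps.getD i []).length := List.length_pos_of_mem hra_mem
      have hjlen : 0 < (comps.getD j []).length := List.length_pos_of_mem hrb_mem
      have hsum : (comps.getD lo []).length + (comps.getD hih []).length
          = (comps.getD i []).length + (comps.getD j []).length := by
        rcases hcase with ⟨h1, h2⟩ | ⟨h1, h2⟩ <;> rw [h1, h2] <;> omega
      rcases hy with h | h
      · simp only [if_neg (hdisj_ij _ h)]
        have := inv.hbound i hi y h
        omega
      · simp only [if_pos h]
        have := inv.hbound j hj y h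
        omega
    · rw [if_neg hkl] at hy ⊢
      by_cases hkh : k < hih
      · rw [if_pos hkh] at hy ⊢
        have hknj : k ≠ j := by rcases hcase with ⟨h1, h2⟩ | ⟨h1, h2⟩ <;> omega
        simp only [if_neg (fun hm => inv.hdisj k j (by omega) hj hknj _ hy hm)]
        exact inv.hbound k (by omega) y hy
      · rw [if_neg hkh] at hy ⊢
        have hknj : k + 1 ≠ j := by rcases hcase with ⟨h1, h2⟩ | ⟨h1, h2⟩ <;> omega
        simp only [if_neg (fun hm => inv.hdisj (k+1) j (by omega) hj hknj _ hy hm)]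
        exact inv.hbound (k+1) (by omega) y hy
  · -- hord
    rw [hkeys']
    have hg : ∀ y ∈ p.keys,
        pvIdx ((comps.modify lo (fun c => PySem.Set.union c (comps.getD hih []))).eraseIdx hih) y =
        (fun m => if m = hih then lo else if m < hih then m else m - 1) (pvIdx comps y) := by
      intro y hyk
      obtain ⟨m, hm, hym⟩ := (inv.hkeys y).1 hyk
      rw [pvIdx_eq inv.hdisj hm hym]
      show _ = if m = hih then lo else if m < hih then m else m - 1
      by_cases hmh : m = hih
      · rw [if_pos hmh]
        apply pvIdx_eq hdisjC (by rw [hlen']; omega)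
        rw [hmem' lo (by omega), if_pos rfl]
        rcases hcase with ⟨h1, h2⟩ | ⟨h1, h2⟩
        · right; rw [← h2, ← hmh]; exact hym
        · left; rw [← h2, ← hmh]; exact hym
      · by_cases hmlt : m < hih
        · rw [if_neg hmh, if_pos hmlt]
          apply pvIdx_eq hdisjC (by rw [hlen']; omega)
          rw [hmem' m (by omega)]
          by_cases hml : m = lo
          · rw [if_pos hml]
            rcases hcase with ⟨h1, h2⟩ | ⟨h1, h2⟩
            · left; rw [← h1, ← hml]; exact hym
            · right; rw [← h1, ← hml]; exact hym
          · rw [if_neg hml, if_pos hmlt]; exact hym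
        · rw [if_neg hmh, if_neg hmlt]
          apply pvIdx_eq hdisjC (by rw [hlen']; omega)
          rw [hmem' (m-1) (by omega), if_neg (by omega), if_neg (by omega)]
          have hmm : m - 1 + 1 = m := by omega
          rw [hmm]; exact hym
    have hcompose : p.keys.map
        (pvIdx ((comps.modify lo (fun c => PySem.Set.union c (comps.getD hih []))).eraseIdx hih)) =
        (p.keys.map (pvIdx comps)).map
          (fun m => if m = hih then lo else if m < hih then m else m - 1) := by
      rw [List.map_map]
      exact List.map_congr_left hg
    rw [hcompose, pvDedup_map]
    have hordold := inv.hord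
    rw [PySem.List.dedup_eq_ofList] at hordold
    rw [PySem.List.dedup_eq_ofList, PySem.List.dedup_eq_ofList, hordold]
    -- now compute ofList ((range n).map g) = range (n-1)
    have hsplit : comps.length = (hih + 1) + (comps.length - hih - 1) := by omega
    rw [hlen', hsplit, List.range_add, List.range_succ, List.map_append, List.map_append]
    have hpiece1 : (List.range hih).map
        (fun m => if m = hih then lo else if m < hih then m else m - 1) = List.range hih := by
      have : ∀ m ∈ List.range hih,
          (fun m => if m = hih then lo else if m < hih then m else m - 1) m = m := by
        intro m hmr
        have hmlt := List.mem_range.1 hmr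
        show (if m = hih then lo else if m < hih then m else m - 1) = m
        rw [if_neg (by omega), if_pos (by omega)]
      rw [List.map_congr_left this]
      simp
    have hpiece2 : ([hih] : List Nat).map
        (fun m => if m = hih then lo else if m < hih then m else m - 1) = [lo] := by
      simp
    have hpiece3 : ((List.range (comps.length - hih - 1)).map (fun x => hih + 1 + x)).map
        (fun m => if m = hih then lo else if m < hih then m else m - 1) =
        (List.range (comps.length - hih - 1)).map (fun x => hih + x) := by
      rw [List.map_map]
      apply List.map_congr_left
      intro t _
      show (if hih + 1 + t = hih then lo else if hih + 1 + t < hih then hih + 1 + t else hih + 1 + t - 1)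
        = hih + t
      rw [if_neg (by omega), if_neg (by omega)]
      omega
    rw [hpiece1, hpiece2, hpiece3]
    rw [PySem.Set.ofList_append, PySem.Set.ofList_append_singleton,
      PySem.Set.ofList_eq_self_of_nodup _ List.nodup_range,
      PySem.Set.add_of_mem (List.mem_range.2 hlohi),
      PySem.Set.update_eq_append_of_disjoint _ _
        (List.nodup_range.map (fun a b hab => by omega))
        (by
          intro x hx
          obtain ⟨t, _, rfl⟩ := List.mem_map.1 hx
          intro hc
          have := List.mem_range.1 hc
          omega)]
    have hfin : hih + 1 + (comps.length - hih - 1) - 1 = hih + (comps.length - hih - 1) := by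
      omega
    rw [hfin, List.range_add]

-- one pair: A's step and B's step stay coupled
lemma pvGetDLast {α : Type} (l : List α) (x : α) (d0 : α) : (l ++ [x]).getD l.length d0 = x := by
  simp [List.getD_eq_getElem?_getD]

lemma pvStep_inv {p comps reps d} (inv : pvInv p comps reps d) (ab : Int × Int) :
    ∃ reps' d', pvInv (pvStepA p ab) (pvStepB comps ab) reps' d' := by
  obtain ⟨a, b⟩ := ab
  by_cases hAex : ∃ i, i < comps.length ∧ a ∈ comps.getD i []
  · obtain ⟨ia, hia, hma⟩ := hAex
    have hfa : comps.findIdx? (fun c => c.contains a) = some ia :=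
      pvFindIdx_some inv.hdisj hia hma
    have hconta : p.contains a = true :=
      (PySem.Dict.contains_iff_mem_keys p a).2 (pvMem_key inv hia hma)
    by_cases hBex : ∃ j, j < comps.length ∧ b ∈ comps.getD j []
    · -- both nodes already known
      obtain ⟨jb, hjb, hmb⟩ := hBex
      have hfb : comps.findIdx? (fun c => c.contains b) = some jb :=
        pvFindIdx_some inv.hdisj hjb hmb
      have hcontb : p.contains b = true :=
        (PySem.Dict.contains_iff_mem_keys p b).2 (pvMem_key inv hjb hmb)
      have hstepA : pvStepA p (a, b) = pvUnion p a b := by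
        simp only [pvStepA, hconta, hcontb, if_true]
      obtain ⟨h1r, h1k, h1inv⟩ := pvFind_spec p.size p a ia inv hia hma (pvFuel inv hia hma)
      obtain ⟨h2r, h2k, h2inv⟩ := pvFind_spec (pvFind p.size p a).2.size (pvFind p.size p a).2
        b jb h1inv hjb hmb (pvFuel h1inv hjb hmb)
      by_cases hij : ia = jb
      · have hroots : (pvFind p.size p a).1
            = (pvFind (pvFind p.size p a).2.size (pvFind p.size p a).2 b).1 := by
          rw [h1r, h2r, hij]
        have hstepB : pvStepB comps (a, b) = comps := by
          unfold pvStepB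
          rw [hfa, hfb]
          simp only [ne_eq, hij, not_true_eq_false, if_false]
        have hu : pvUnion p a b
            = (pvFind (pvFind p.size p a).2.size (pvFind p.size p a).2 b).2 := by
          unfold pvUnion
          rw [if_neg (by simp [hroots])]
        rw [hstepA, hstepB, hu]
        exact ⟨reps, d, h2inv⟩
      · have hstepB : pvStepB comps (a, b) =
            (comps.modify (min ia jb) (fun c => PySem.Set.union c (comps.getD (max ia jb) []))).eraseIdx
              (max ia jb) := by
          unfold pvStepB
          rw [hfa, hfb]
          simp only [ne_eq, hij, not_false_eq_true, if_true]
        have hrne : reps.getD ia 0 ≠ reps.getD jb 0 := by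
          intro hc
          exact inv.hdisj ia jb hia hjb hij _ (hc ▸ inv.hrep ia hia) (inv.hrep jb hjb)
        have hu : pvUnion p a b
            = (pvFind (pvFind p.size p a).2.size (pvFind p.size p a).2 b).2.insert
                (reps.getD jb 0) (reps.getD ia 0) := by
          unfold pvUnion
          rw [if_pos (by rw [h1r, h2r]; exact fun hc => hrne hc), h1r, h2r]
        have hlink := pvInv_link (lo := min ia jb) (hih := max ia jb) h2inv hia hjb hij
          (by omega) (by omega)
        rw [hstepA, hstepB, hu]
        exact ⟨_, _, hlink⟩
    · -- a known, b fresh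
      push Not at hBex
      have hbnot : ∀ j, j < comps.length → b ∉ comps.getD j [] := hBex
      have hfb : comps.findIdx? (fun c => c.contains b) = none := pvFindIdx_none hbnot
      have hbkeys : b ∉ p.keys := by
        intro hc
        obtain ⟨j, hj, hmj⟩ := (inv.hkeys b).1 hc
        exact hbnot j hj hmj
      have hcontb : p.contains b = false := by
        by_contra hc
        exact hbkeys ((PySem.Dict.contains_iff_mem_keys p b).1 (by simpa using hc))
      have hstepA : pvStepA p (a, b) = pvUnion (p.insert b b) a b := by
        simp only [pvStepA, hconta, hcontb, if_true, Bool.false_eq_true, if_false]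
      have hstepB : pvStepB comps (a, b) = comps.modify ia (fun c => PySem.Set.add c b) := by
        unfold pvStepB
        rw [hfa, hfb]
      have inv2 := pvInv_fresh inv hbkeys
      have hlen2 : (comps ++ [[b]] : List (PySem.Set Int)).length = comps.length + 1 := by simp
      have hma2 : a ∈ (comps ++ [[b]]).getD ia [] := by
        rw [List.getD_append _ _ _ _ hia]; exact hma
      have hmb2 : b ∈ (comps ++ [[b]]).getD comps.length [] := by
        rw [pvGetDLast]; simp
      obtain ⟨h1r, h1k, h1inv⟩ := pvFind_spec (p.insert b b).size (p.insert b b) a ia inv2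
        (by omega) hma2 (pvFuel inv2 (by omega) hma2)
      obtain ⟨h2r, h2k, h2inv⟩ := pvFind_spec _ (pvFind (p.insert b b).size (p.insert b b) a).2
        b comps.length h1inv (by omega) hmb2 (pvFuel h1inv (by omega) hmb2)
      have hrae : (reps ++ [b]).getD ia 0 = reps.getD ia 0 :=
        List.getD_append _ _ _ _ (by rw [inv.hlen]; exact hia)
      have hrbe : (reps ++ [b]).getD comps.length 0 = b := by
        rw [← inv.hlen, pvGetDLast]
      have hrne : reps.getD ia 0 ≠ b := by
        intro hc
        exact hbkeys (hc ▸ pvMem_key inv hia (inv.hrep ia hia))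
      have hu : pvUnion (p.insert b b) a b
          = (pvFind (pvFind (p.insert b b).size (p.insert b b) a).2.size
              (pvFind (p.insert b b).size (p.insert b b) a).2 b).2.insert
              ((reps ++ [b]).getD comps.length 0) ((reps ++ [b]).getD ia 0) := by
        unfold pvUnion
        rw [if_pos (by rw [h1r, h2r, hrae, hrbe]; exact fun hc => hrne hc), h1r, h2r]
      have hlink := pvInv_link (lo := ia) (hih := comps.length) h2inv
        (by omega) (by omega) (by omega) (Or.inl ⟨rfl, rfl⟩) (by omega)
      have hE : ((comps ++ [[b]]).modify ia
            (fun c => PySem.Set.union c ((comps ++ [[b]]).getD comps.length []))).eraseIdx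
              comps.length
          = comps.modify ia (fun c => PySem.Set.add c b) := by
        apply pvList_ext _ _ ([] : PySem.Set Int)
        · rw [List.length_eraseIdx]
          simp [List.length_modify]
        · intro k hk
          have hk' : k < comps.length := by
            rw [List.length_eraseIdx] at hk
            simp [List.length_modify] at hk
            omega
          rw [pvModifyErase_getD _ _ _ ia comps.length (by omega) (by simp) k (by simp; omega)]
          rw [pvModify_getD _ _ _ ia k hk']
          by_cases hkl : k = ia
          · subst hkl
            rw [if_pos rfl, if_pos rfl, pvGetDLast, List.getD_append _ _ _ _ hia]
            rfl
          · rw [if_neg hkl, if_pos hk', if_neg (fun hc => hkl (hc.symm)),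
              List.getD_append _ _ _ _ hk']
      rw [hstepA, hstepB, hu, ← hE]
      exact ⟨_, _, hlink⟩
  · -- a fresh
    push Not at hAex
    have hanot : ∀ i, i < comps.length → a ∉ comps.getD i [] := hAex
    have hfa : comps.findIdx? (fun c => c.contains a) = none := pvFindIdx_none hanot
    have hakeys : a ∉ p.keys := by
      intro hc
      obtain ⟨i, hi, hmi⟩ := (inv.hkeys a).1 hc
      exact hanot i hi hmi
    have hconta : p.contains a = false := by
      by_contra hc
      exact hakeys ((PySem.Dict.contains_iff_mem_keys p a).1 (by simpa using hc))
    have inv1 := pvInv_fresh inv hakeys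
    by_cases hBex : ∃ j, j < comps.length ∧ b ∈ comps.getD j []
    · -- a fresh, b known
      obtain ⟨jb, hjb, hmb⟩ := hBex
      have hfb : comps.findIdx? (fun c => c.contains b) = some jb :=
        pvFindIdx_some inv.hdisj hjb hmb
      have hcontb : (p.insert a a).contains b = true := by
        rw [PySem.Dict.contains_insert]
        have : p.contains b = true :=
          (PySem.Dict.contains_iff_mem_keys p b).2 (pvMem_key inv hjb hmb)
        simp [this]
      have hstepA : pvStepA p (a, b) = pvUnion (p.insert a a) a b := by
        simp only [pvStepA, hconta, hcontb, Bool.false_eq_true, if_false, if_true]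
      have hstepB : pvStepB comps (a, b) = comps.modify jb (fun c => PySem.Set.add c a) := by
        unfold pvStepB
        rw [hfa, hfb]
      have hma2 : a ∈ (comps ++ [[a]]).getD comps.length [] := by
        rw [pvGetDLast]; simp
      have hmb2 : b ∈ (comps ++ [[a]]).getD jb [] := by
        rw [List.getD_append _ _ _ _ hjb]; exact hmb
      obtain ⟨h1r, h1k, h1inv⟩ := pvFind_spec (p.insert a a).size (p.insert a a) a comps.length
        inv1 (by simp) hma2 (pvFuel inv1 (by simp) hma2)
      obtain ⟨h2r, h2k, h2inv⟩ := pvFind_spec _ (pvFind (p.insert a a).size (p.insert a a) a).2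
        b jb h1inv (by simp; omega) hmb2 (pvFuel h1inv (by simp; omega) hmb2)
      have hrae : (reps ++ [a]).getD comps.length 0 = a := by
        rw [← inv.hlen, pvGetDLast]
      have hrbe : (reps ++ [a]).getD jb 0 = reps.getD jb 0 :=
        List.getD_append _ _ _ _ (by rw [inv.hlen]; exact hjb)
      have hrne : a ≠ reps.getD jb 0 := by
        intro hc
        exact hakeys (hc ▸ pvMem_key inv hjb (inv.hrep jb hjb))
      have hu : pvUnion (p.insert a a) a b
          = (pvFind (pvFind (p.insert a a).size (p.insert a a) a).2.size
              (pvFind (p.insert a a).size (p.insert a a) a).2 b).2.insert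
              ((reps ++ [a]).getD jb 0) ((reps ++ [a]).getD comps.length 0) := by
        unfold pvUnion
        rw [if_pos (by rw [h1r, h2r, hrae, hrbe]; exact fun hc => hrne hc), h1r, h2r]
      have hlink := pvInv_link (lo := jb) (hih := comps.length) h2inv
        (by simp) (by simp; omega) (by omega) (Or.inr ⟨rfl, rfl⟩) (by omega)
      have hE : ((comps ++ [[a]]).modify jb
            (fun c => PySem.Set.union c ((comps ++ [[a]]).getD comps.length []))).eraseIdx
              comps.length
          = comps.modify jb (fun c => PySem.Set.add c a) := by
        apply pvList_ext _ _ ([] : PySem.Set Int)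
        · rw [List.length_eraseIdx]
          simp [List.length_modify]
        · intro k hk
          have hk' : k < comps.length := by
            rw [List.length_eraseIdx] at hk
            simp [List.length_modify] at hk
            omega
          rw [pvModifyErase_getD _ _ _ jb comps.length (by omega) (by simp) k (by simp; omega)]
          rw [pvModify_getD _ _ _ jb k hk']
          by_cases hkl : k = jb
          · subst hkl
            rw [if_pos rfl, if_pos rfl, pvGetDLast, List.getD_append _ _ _ _ hjb]
            rfl
          · rw [if_neg hkl, if_pos hk', if_neg (fun hc => hkl (hc.symm)),
              List.getD_append _ _ _ _ hk']
      rw [hstepA, hstepB, hu, ← hE]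
      exact ⟨_, _, hlink⟩
    · -- both fresh
      push Not at hBex
      have hbnot : ∀ j, j < comps.length → b ∉ comps.getD j [] := hBex
      have hfb : comps.findIdx? (fun c => c.contains b) = none := pvFindIdx_none hbnot
      have hstepB : pvStepB comps (a, b)
          = comps ++ [PySem.Set.add (PySem.Set.add PySem.Set.empty a) b] := by
        unfold pvStepB
        rw [hfa, hfb]
      by_cases hab : a = b
      · -- same fresh node twice
        subst hab
        have hcontb : (p.insert a a).contains a = true := by
          rw [PySem.Dict.contains_insert]; simp
        have hstepA : pvStepA p (a, a) = pvUnion (p.insert a a) a a := by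
          simp only [pvStepA, hconta, hcontb, Bool.false_eq_true, if_false, if_true]
        have hma2 : a ∈ (comps ++ [[a]]).getD comps.length [] := by
          rw [pvGetDLast]; simp
        obtain ⟨h1r, h1k, h1inv⟩ := pvFind_spec (p.insert a a).size (p.insert a a) a comps.length
          inv1 (by simp) hma2 (pvFuel inv1 (by simp) hma2)
        obtain ⟨h2r, h2k, h2inv⟩ := pvFind_spec _ (pvFind (p.insert a a).size (p.insert a a) a).2
          a comps.length h1inv (by simp) hma2 (pvFuel h1inv (by simp) hma2)
        have hu : pvUnion (p.insert a a) a a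
            = (pvFind (pvFind (p.insert a a).size (p.insert a a) a).2.size
                (pvFind (p.insert a a).size (p.insert a a) a).2 a).2 := by
          unfold pvUnion
          rw [if_neg (by rw [h1r, h2r]; simp)]
        have hsetB : PySem.Set.add (PySem.Set.add PySem.Set.empty a) a = [a] := by
          simp [PySem.Set.add_of_mem]
        rw [hstepA, hstepB, hu, hsetB]
        exact ⟨_, _, h2inv⟩
      · -- two distinct fresh nodes
        have hcontb : (p.insert a a).contains b = false := by
          rw [PySem.Dict.contains_insert]
          have hcb : p.contains b = false := by
            by_contra hc
            have hbk : b ∈ p.keys :=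
              (PySem.Dict.contains_iff_mem_keys p b).1 (by simpa using hc)
            obtain ⟨j, hj, hmj⟩ := (inv.hkeys b).1 hbk
            exact hbnot j hj hmj
          simp [hcb]
          exact fun hc => hab hc.symm
        have hbkeys1 : b ∉ (p.insert a a).keys := by
          rw [PySem.Dict.keys_insert_of_not_contains p a hconta]
          intro hc
          rcases List.mem_append.1 hc with hc | hc
          · obtain ⟨j, hj, hmj⟩ := (inv.hkeys b).1 hc
            exact hbnot j hj hmj
          · have hba : b = a := by simpa using hc
            exact hab hba.symm
        have inv2 := pvInv_fresh inv1 hbkeys1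
        have hstepA : pvStepA p (a, b) = pvUnion ((p.insert a a).insert b b) a b := by
          simp only [pvStepA, hconta, hcontb, Bool.false_eq_true, if_false]
        have hma2 : a ∈ ((comps ++ [[a]]) ++ [[b]]).getD comps.length [] := by
          rw [List.getD_append _ _ _ _ (by simp)]
          rw [pvGetDLast]; simp
        have hmb2 : b ∈ ((comps ++ [[a]]) ++ [[b]]).getD (comps.length + 1) [] := by
          have : comps.length + 1 = (comps ++ [[a]]).length := by simp
          rw [this, pvGetDLast]; simp
        obtain ⟨h1r, h1k, h1inv⟩ := pvFind_spec ((p.insert a a).insert b b).size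
          ((p.insert a a).insert b b) a comps.length inv2 (by simp) hma2
          (pvFuel inv2 (by simp) hma2)
        obtain ⟨h2r, h2k, h2inv⟩ := pvFind_spec _
          (pvFind ((p.insert a a).insert b b).size ((p.insert a a).insert b b) a).2
          b (comps.length + 1) h1inv (by simp) hmb2 (pvFuel h1inv (by simp) hmb2)
        have hrae : ((reps ++ [a]) ++ [b]).getD comps.length 0 = a := by
          rw [List.getD_append _ _ _ _ (by simp [inv.hlen])]
          rw [← inv.hlen, pvGetDLast]
        have hrbe : ((reps ++ [a]) ++ [b]).getD (comps.length + 1) 0 = b := by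
          have : comps.length + 1 = (reps ++ [a]).length := by simp [inv.hlen]
          rw [this, pvGetDLast]
        have hu : pvUnion ((p.insert a a).insert b b) a b
            = (pvFind (pvFind ((p.insert a a).insert b b).size ((p.insert a a).insert b b) a).2.size
                (pvFind ((p.insert a a).insert b b).size ((p.insert a a).insert b b) a).2 b).2.insert
                (((reps ++ [a]) ++ [b]).getD (comps.length + 1) 0)
                (((reps ++ [a]) ++ [b]).getD comps.length 0) := by
          unfold pvUnion
          rw [if_pos (by rw [h1r, h2r, hrae, hrbe]; exact fun hc => hab hc), h1r, h2r]
        have hlink := pvInv_link (lo := comps.length) (hih := comps.length + 1) h2inv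
          (by simp) (by simp) (by omega) (Or.inl ⟨rfl, rfl⟩) (by omega)
        have hE : (((comps ++ [[a]] ++ [[b]]).modify comps.length
              (fun c => PySem.Set.union c ((comps ++ [[a]] ++ [[b]]).getD (comps.length + 1) []))).eraseIdx
                (comps.length + 1))
            = comps ++ [PySem.Set.add (PySem.Set.add PySem.Set.empty a) b] := by
          apply pvList_ext _ _ ([] : PySem.Set Int)
          · rw [List.length_eraseIdx]
            simp [List.length_modify]
          · intro k hk
            have hk' : k < comps.length + 1 := by
              rw [List.length_eraseIdx] at hk
              simp [List.length_modify] at hk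
              omega
            rw [pvModifyErase_getD _ _ _ comps.length (comps.length + 1) (by omega) (by simp) k
              (by simp; omega)]
            by_cases hkl : k = comps.length
            · subst hkl
              rw [if_pos rfl]
              have e1 : (comps ++ [[a]] ++ [[b]]).getD comps.length [] = [a] := by
                rw [List.getD_append _ _ _ _ (by simp), pvGetDLast]
              have e2 : (comps ++ [[a]] ++ [[b]]).getD (comps.length + 1) [] = [b] := by
                have hidx : comps.length + 1 = (comps ++ [[a]]).length := by simp
                rw [hidx, pvGetDLast]
              rw [e1, e2, pvGetDLast]
              rfl
            · have hkn : k < comps.length := by omega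
              have eL : (comps ++ [[a]] ++ [[b]]).getD k [] = comps.getD k [] := by
                rw [List.getD_append _ _ _ _ (by simp; omega :
                  k < (comps ++ [[a]]).length), List.getD_append _ _ _ _ hkn]
              have eR : (comps ++ [PySem.Set.add (PySem.Set.add PySem.Set.empty a) b]).getD k []
                  = comps.getD k [] := List.getD_append _ _ _ _ hkn
              rw [if_neg hkl, if_pos (by omega), eL, eR]
        rw [hstepA, hstepB, hu, ← hE]
        exact ⟨_, _, hlink⟩


lemma pvFold_inv (l : List (Int × Int)) :
    ∃ reps d, pvInv (l.foldl pvStepA PySem.Dict.empty) (l.foldl pvStepB []) reps d := by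
  suffices h : ∀ (p : PySem.Dict Int Int) (comps : List (PySem.Set Int)) reps d,
      pvInv p comps reps d →
      ∃ reps' d', pvInv (l.foldl pvStepA p) (l.foldl pvStepB comps) reps' d' by
    apply h PySem.Dict.empty [] [] (fun _ => 0)
    refine ⟨rfl, ?_, ?_, ?_, ?_, ?_, ?_, ?_, ?_, ?_, ?_, ?_⟩
    · intro x
      simp [PySem.Dict.keys_empty]
    · simp [PySem.Dict.keys_empty]
    · intro i j hi; simp at hi
    · intro i hi; simp at hi
    · intro i hi; simp at hi
    · intro i hi; simp at hi
    · intro i hi; simp at hi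
    · intro i hi; simp at hi
    · intro i hi; simp at hi
    · intro i hi; simp at hi
    · rfl
  induction l with
  | nil => intro p comps reps d inv; exact ⟨reps, d, inv⟩
  | cons ab t ih =>
    intro p comps reps d inv
    obtain ⟨r1, d1, inv1⟩ := pvStep_inv inv ab
    exact ih _ _ r1 d1 inv1

-- the grouping pass with threaded parent dict equals a pure dict fold over the fixed root map
lemma pvGroup_factor {comps reps d} : ∀ (ks : List Int) (g : PySem.Dict Int (PySem.Set Int))
    (p : PySem.Dict Int Int), pvInv p comps reps d →
    (∀ x ∈ ks, ∃ i, i < comps.length ∧ x ∈ comps.getD i []) →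
    (ks.foldl pvGroupStep (g, p)).1 =
      ks.foldl (fun g x => g.insert (pvRoot comps reps x)
        (PySem.Set.add (g.getD (pvRoot comps reps x) PySem.Set.empty) x)) g := by
  intro ks
  induction ks with
  | nil => intro g p inv hall; rfl
  | cons x t ih =>
    intro g p inv hall
    obtain ⟨i, hi, hxi⟩ := hall x (by simp)
    obtain ⟨h1r, h1k, h1inv⟩ := pvFind_spec p.size p x i inv hi hxi (pvFuel inv hi hxi)
    have hroot : pvRoot comps reps x = reps.getD i 0 := by
      unfold pvRoot
      rw [pvIdx_eq inv.hdisj hi hxi]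
    have hg : pvGroupStep (g, p) x = (g.insert (pvRoot comps reps x)
        (PySem.Set.add (g.getD (pvRoot comps reps x) PySem.Set.empty) x),
        (pvFind p.size p x).2) := by
      simp only [pvGroupStep]
      rw [h1r, hroot]
    simp only [List.foldl_cons]
    rw [hg]
    exact ih _ _ h1inv (fun y hy => hall y (by simp [hy]))

-- characterization of the pure grouping fold
lemma pvGroup_items (r : Int → Int) : ∀ (ks : List Int), ks.Nodup →
    (ks.foldl (fun g x => g.insert (r x)
        (PySem.Set.add (g.getD (r x) PySem.Set.empty) x)) PySem.Dict.empty).items =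
      (PySem.List.dedup (ks.map r)).map (fun ρ => (ρ, ks.filter (fun x => r x == ρ))) := by
  intro ks
  induction ks using List.reverseRecOn with
  | nil => intro _; rfl
  | append_singleton t x ih =>
    intro hnodup
    obtain ⟨htn, -, hdisj⟩ := List.nodup_append.1 hnodup
    have hxt : x ∉ t := fun hc => hdisj x hc x (by simp) rfl
    have ihG := ih htn
    have hkeysG : (t.foldl (fun g x => g.insert (r x)
        (PySem.Set.add (g.getD (r x) PySem.Set.empty) x)) PySem.Dict.empty).keys
        = PySem.List.dedup (t.map r) := by
      show ((t.foldl _ PySem.Dict.empty).items.map Prod.fst) = _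
      rw [ihG, List.map_map]
      have hid : ∀ ρ ∈ PySem.List.dedup (t.map r),
          (Prod.fst ∘ fun ρ => (ρ, t.filter (fun x => r x == ρ))) ρ = ρ := fun ρ _ => rfl
      rw [List.map_congr_left hid, List.map_id']
    have hnodupkeys : (t.foldl (fun g x => g.insert (r x)
        (PySem.Set.add (g.getD (r x) PySem.Set.empty) x)) PySem.Dict.empty).keys.Nodup := by
      rw [hkeysG]
      exact PySem.List.nodup_dedup _
    rw [List.foldl_append]
    simp only [List.foldl_cons, List.foldl_nil]
    rw [List.map_append, List.map_cons, List.map_nil, PySem.List.dedup_eq_ofList,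
      PySem.Set.ofList_append_singleton]
    by_cases hmem : r x ∈ t.map r
    · have hcont : (t.foldl (fun g x => g.insert (r x)
          (PySem.Set.add (g.getD (r x) PySem.Set.empty) x)) PySem.Dict.empty).contains (r x)
          = true := by
        apply (PySem.Dict.contains_iff_mem_keys _ _).2
        rw [hkeysG]
        exact (PySem.List.mem_dedup _ _).2 hmem
      have hgetD : (t.foldl (fun g x => g.insert (r x)
          (PySem.Set.add (g.getD (r x) PySem.Set.empty) x)) PySem.Dict.empty).getD (r x)
          PySem.Set.empty = t.filter (fun y => r y == r x) := by
        apply PySem.Dict.getD_of_mem_items _ ?_ hnodupkeys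
        rw [ihG]
        exact List.mem_map_of_mem ((PySem.List.mem_dedup _ _).2 hmem)
      have hded : (PySem.Set.ofList (t.map r)).add (r x) = PySem.List.dedup (t.map r) := by
        have hin : r x ∈ PySem.Set.ofList (t.map r) := by
          rw [← PySem.List.dedup_eq_ofList]
          exact (PySem.List.mem_dedup _ _).2 hmem
        rw [PySem.Set.add_of_mem hin, ← PySem.List.dedup_eq_ofList]
      rw [PySem.Dict.items_insert_of_contains _ _ hcont, ihG, List.map_map, hded]
      apply List.map_congr_left
      intro ρ hρ
      simp only [Function.comp_apply]
      by_cases hρx : ρ = r x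
      · subst hρx
        rw [if_pos (by simp), hgetD]
        have hfadd : PySem.Set.add (t.filter (fun y => r y == r x)) x
            = t.filter (fun y => r y == r x) ++ [x] := by
          apply PySem.Set.add_of_not_mem
          intro hc
          exact hxt (List.mem_of_mem_filter hc)
        rw [hfadd, List.filter_append]
        simp
      · rw [if_neg (by simpa using hρx)]
        rw [List.filter_append]
        have : ([x].filter (fun y => r y == ρ)) = [] := by
          simp only [List.filter_cons, List.filter_nil]
          rw [if_neg (by simpa using fun hc => hρx hc.symm)]
        rw [this, List.append_nil]
    · have hcont : (t.foldl (fun g x => g.insert (r x)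
          (PySem.Set.add (g.getD (r x) PySem.Set.empty) x)) PySem.Dict.empty).contains (r x)
          = false := by
        by_contra hc
        have : r x ∈ PySem.List.dedup (t.map r) := by
          rw [← hkeysG]
          exact (PySem.Dict.contains_iff_mem_keys _ _).1 (by simpa using hc)
        exact hmem ((PySem.List.mem_dedup _ _).1 this)
      have hgetD : (t.foldl (fun g x => g.insert (r x)
          (PySem.Set.add (g.getD (r x) PySem.Set.empty) x)) PySem.Dict.empty).getD (r x)
          PySem.Set.empty = PySem.Set.empty := PySem.Dict.getD_of_not_contains _ _ hcont
      have hded : (PySem.Set.ofList (t.map r)).add (r x)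
          = PySem.List.dedup (t.map r) ++ [r x] := by
        have hnin : r x ∉ PySem.Set.ofList (t.map r) := by
          rw [← PySem.List.dedup_eq_ofList]
          intro hc
          exact hmem ((PySem.List.mem_dedup _ _).1 hc)
        rw [PySem.Set.add_of_not_mem hnin, ← PySem.List.dedup_eq_ofList]
      rw [PySem.Dict.items_insert_of_not_contains _ _ hcont, ihG, hded]
      rw [List.map_append, List.map_cons, List.map_nil]
      congr 1
      · apply List.map_congr_left
        intro ρ hρ
        have hρt : ρ ∈ t.map r := (PySem.List.mem_dedup _ _).1 hρ
        have hρx : ¬ (r x = ρ) := fun hc => hmem (hc ▸ hρt)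
        rw [List.filter_append]
        have : ([x].filter (fun y => r y == ρ)) = [] := by
          simp only [List.filter_cons, List.filter_nil]
          rw [if_neg (by simpa using hρx)]
        rw [this, List.append_nil]
      · rw [hgetD]
        have hfilt : t.filter (fun y => r y == r x) = [] := by
          rw [List.filter_eq_nil_iff]
          intro y hy hc
          have hryx : r y = r x := by simpa using hc
          exact hmem (hryx ▸ List.mem_map_of_mem hy)
        rw [List.filter_append, hfilt, List.nil_append]
        have : ([x].filter (fun y => r y == r x)) = [x] := by
          simp
        rw [this]
        rfl

-- assembling the grouping pass: A's output is B's components, each sorted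
lemma pvFinal {p : PySem.Dict Int Int} {comps : List (PySem.Set Int)} {reps : List Int}
    {d : Int → Nat} (inv : pvInv p comps reps d) :
    ((p.keys.foldl pvGroupStep (PySem.Dict.empty, p)).1).values.map
        (fun s => PySem.List.sorted s (fun x => x) false)
      = comps.map (fun c => PySem.List.sorted c (fun x => x) false) := by
  rw [pvGroup_factor p.keys PySem.Dict.empty p inv (fun x hx => (inv.hkeys x).1 hx)]
  have hvals : (p.keys.foldl (fun g x => g.insert (pvRoot comps reps x)
      (PySem.Set.add (g.getD (pvRoot comps reps x) PySem.Set.empty) x)) PySem.Dict.empty).values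
      = (PySem.List.dedup (p.keys.map (pvRoot comps reps))).map
          (fun ρ => p.keys.filter (fun x => pvRoot comps reps x == ρ)) := by
    show (p.keys.foldl _ PySem.Dict.empty).items.map Prod.snd = _
    rw [pvGroup_items (pvRoot comps reps) p.keys inv.hnodupk, List.map_map]
    exact List.map_congr_left (fun ρ _ => rfl)
  rw [hvals]
  have hmapr : p.keys.map (pvRoot comps reps)
      = (p.keys.map (pvIdx comps)).map (fun i => reps.getD i 0) := by
    rw [List.map_map]
    exact List.map_congr_left (fun y _ => rfl)
  have hrange : (List.range comps.length).map (fun i => reps.getD i 0) = reps := by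
    apply pvList_ext _ _ 0 (by simp [inv.hlen])
    intro k hk
    simp only [List.length_map, List.length_range] at hk
    have hkr : k < reps.length := by rw [inv.hlen]; exact hk
    rw [List.getD_eq_getElem _ _ (by simp [hk]), List.getElem_map, List.getElem_range,
      List.getD_eq_getElem _ _ hkr]
  have hded : PySem.List.dedup (p.keys.map (pvRoot comps reps)) = reps := by
    rw [hmapr, pvDedup_map, inv.hord, hrange, PySem.List.dedup_eq_ofList,
      PySem.Set.ofList_eq_self_of_nodup reps (pvReps_nodup inv)]
  rw [hded, List.map_map]
  have hrinj : ∀ m k, m < reps.length → k < reps.length →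
      reps.getD m 0 = reps.getD k 0 → m = k := by
    intro m k hm hk he
    rw [List.getD_eq_getElem _ _ hm, List.getD_eq_getElem _ _ hk] at he
    have hinj := List.nodup_iff_injective_getElem.1 (pvReps_nodup inv)
    have := hinj (a₁ := ⟨m, hm⟩) (a₂ := ⟨k, hk⟩) he
    simpa using this
  apply pvList_ext _ _ ([] : List Int)
  · simp [inv.hlen]
  · intro k hk
    simp only [List.length_map] at hk
    have hkc : k < comps.length := by rw [← inv.hlen]; exact hk
    rw [List.getD_eq_getElem _ _ (by simp [hk] : k < (reps.map _).length), List.getElem_map]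
    rw [List.getD_eq_getElem _ _ (by simp [inv.hlen ▸ hk] :
      k < (comps.map (fun c => PySem.List.sorted c (fun x => x) false)).length), List.getElem_map]
    simp only [Function.comp_apply]
    apply PySem.List.sorted_eq_sorted_of_perm _ _ (fun x => x) (fun u v h => h)
    rw [List.perm_ext_iff_of_nodup (List.Nodup.filter _ inv.hnodupk)
      (by rw [← List.getD_eq_getElem comps [] hkc]; exact inv.hnodup k hkc)]
    intro y
    rw [← List.getD_eq_getElem comps [] hkc, ← List.getD_eq_getElem reps 0 hk]
    constructor
    · intro hy
      obtain ⟨hyk, hyr⟩ := List.mem_filter.1 hy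
      obtain ⟨m, hm, hym⟩ := (inv.hkeys y).1 hyk
      have hry : pvRoot comps reps y = reps.getD m 0 := by
        unfold pvRoot
        rw [pvIdx_eq inv.hdisj hm hym]
      have heq : reps.getD m 0 = reps.getD k 0 := by
        rw [← hry]
        simpa using hyr
      have hmk : m = k := hrinj m k (by rw [inv.hlen]; exact hm) hk heq
      exact hmk ▸ hym
    · intro hy
      apply List.mem_filter.2
      refine ⟨(inv.hkeys y).2 ⟨k, hkc, hy⟩, ?_⟩
      have hry : pvRoot comps reps y = reps.getD k 0 := by
        unfold pvRoot
        rw [pvIdx_eq inv.hdisj hkc hy]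
      simpa using hry

-- ===== VERDICT (by name: the statement is the Claim_ definition above) =====
theorem build_paths_spec : Claim_equal_build_paths := by
  intro l _
  show build_paths l = build_paths_alt l
  obtain ⟨reps, d, inv⟩ := pvFold_inv l
  exact pvFinal inv
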